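-- pv_equiv track=rewrite | github.com/LingC2001/pipeline-decommissioning | robotic_simulation/python_files/layer_segmentation.py | average_nearby
-- ===== SOURCE A (Python) =====
-- def average_nearby(radii, threshold):
--     """
--     Given a LIST of integers, it averages and combines nearby integers.
--
--     :param radii: A LIST of INTEGERs containing detected radii values from varius functions
--     :param threshold: INTEGER threshold for merging. Example: threshold=5 means all integers within 5 of each other gets merged
--     :returns circle_radii: A LIST of remaining integers after merging and averaging
--     """
--     sorted_radii = sorted(radii)
--     circle_radii = []
--     total = sorted_radii[0]
--     count = 1
--     if len(sorted_radii) > 1: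
--         for i in range(len(sorted_radii)-1):
--             if sorted_radii[i+1] - sorted_radii[i] <= threshold:
--                 total += sorted_radii[i+1]
--                 count += 1
--             else:
--                 circle_radii.append(int(total/count))
--                 total = sorted_radii[i+1]
--                 count = 1
--
--             if i == len(sorted_radii)-2: # Last element
--                 circle_radii.append(int(total/count))
--     else:
--         circle_radii.append(sorted_radii[0])
--     return circle_radii
-- ===== SOURCE B (Python) =====
-- def average_nearby(radii, threshold):
--     s = sorted(radii)
--     clusters = [[s[0]]]
--     for x in s[1:]:
--         if x - clusters[-1][-1] <= threshold:
--             clusters[-1].append(x)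
--         else:
--             clusters.append([x])
--     return [int(sum(c) / len(c)) for c in clusters]
-- ===== Notes on version B (the rewrite author's own statement) =====
-- stated objective: simpler
-- what changed: B replaces A's index loop with fused running total/count accumulators and a last-iteration flag by two plain passes: partition the sorted radii into clusters (new cluster when the gap to the previous element exceeds threshold), then map each cluster to int(sum/len).
-- outside the precondition, e.g. on average_nearby([], 3): A raises IndexError, B raises IndexError
import Mathlib
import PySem

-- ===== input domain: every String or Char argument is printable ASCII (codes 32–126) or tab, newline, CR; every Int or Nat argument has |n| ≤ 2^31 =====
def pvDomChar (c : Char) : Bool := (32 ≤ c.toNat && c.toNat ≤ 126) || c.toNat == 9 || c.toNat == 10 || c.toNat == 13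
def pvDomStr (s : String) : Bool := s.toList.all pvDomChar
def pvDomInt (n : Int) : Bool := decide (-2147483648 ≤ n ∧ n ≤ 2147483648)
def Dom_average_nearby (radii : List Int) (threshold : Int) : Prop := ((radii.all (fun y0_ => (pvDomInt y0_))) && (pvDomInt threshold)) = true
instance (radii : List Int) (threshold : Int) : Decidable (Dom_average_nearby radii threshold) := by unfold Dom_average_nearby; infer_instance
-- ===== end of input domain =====

-- B is a simpler decomposition: a grouping pass then an averaging pass, same return value as A.

-- ===== PORT A =====
-- A's for-loop over i (with state circle_radii/total/count, reading sorted[i] and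
-- sorted[i+1] and appending the open average at the last index) as the obvious
-- structural recursion: prev = sorted[i], the remaining list = sorted[i+1:].
def pvLoopA (threshold : Int) (cr : List Int) (total count prev : Int) :
    List Int → List Int
  | [] => cr
  | [x] =>    -- i == len-2: run the body once more, then append the open average
    let st :=
      if x - prev ≤ threshold then (cr, total + x, count + 1)
      else (cr ++ [PySem.Int.truncdiv total count], x, (1 : Int))
    st.1 ++ [PySem.Int.truncdiv st.2.1 st.2.2]
  | x :: y :: rest =>
    let st :=
      if x - prev ≤ threshold then (cr, total + x, count + 1)
      else (cr ++ [PySem.Int.truncdiv total count], x, (1 : Int))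
    pvLoopA threshold st.1 st.2.1 st.2.2 x (y :: rest)

def average_nearby (radii : List Int) (threshold : Int) : List Int :=
  match PySem.List.sorted radii (fun v => v) false with
  | [] => []                                   -- Python raises IndexError here (outside Pre_)
  | t0 :: rest =>
    match rest with
    | [] => [t0]                               -- len(sorted_radii) ≤ 1 branch
    | _ => pvLoopA threshold [] t0 1 t0 rest

-- ===== PORT B =====
-- grouping pass: pvGroupTail th x l = (tail of the cluster containing x, remaining clusters)
def pvGroupTail (threshold : Int) : Int → List Int → List Int × List (List Int)
  | _, [] => ([], [])
  | x, y :: l =>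
    let g := pvGroupTail threshold y l
    if y - x ≤ threshold then (y :: g.1, g.2)
    else ([], (y :: g.1) :: g.2)

def pvAvg (c : List Int) : Int := PySem.Int.truncdiv c.sum c.length

def average_nearby_alt (radii : List Int) (threshold : Int) : List Int :=
  match PySem.List.sorted radii (fun v => v) false with
  | [] => []                                   -- Python raises IndexError here (outside Pre_)
  | x :: rest =>
    let g := pvGroupTail threshold x rest
    ((x :: g.1) :: g.2).map pvAvg

-- ===== PRECONDITION & SPEC =====
-- Pre_ excludes only the empty list, on which Python A raises IndexError (sorted_radii[0]).
def Pre_average_nearby (radii : List Int) (threshold : Int) : Prop := radii ≠ []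
instance (radii : List Int) (threshold : Int) : Decidable (Pre_average_nearby radii threshold) := by unfold Pre_average_nearby; infer_instance
def pvWitness_average_nearby : List Int × Int := ([7, 1, 9], 3)

def Spec_average_nearby (radii : List Int) (threshold : Int) (out : List Int) : Prop := out = average_nearby_alt radii threshold
instance (radii : List Int) (threshold : Int) (out : List Int) : Decidable (Spec_average_nearby radii threshold out) := by unfold Spec_average_nearby; infer_instance

-- ===== CLAIM (what is proved, stated in full; the proofs are below) =====
def Claim_equal_average_nearby : Prop := ∀ (radii : List Int) (threshold : Int), Dom_average_nearby radii threshold → Pre_average_nearby radii threshold → Spec_average_nearby radii threshold (average_nearby radii threshold)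

-- ===== LEMMAS AND PROOFS =====
-- Loop invariant: the A-loop with an open cluster summarised by (total, count, prev)
-- produces exactly the continuation average followed by B's remaining cluster averages.
lemma pvLoopA_eq (threshold : Int) :
    ∀ (l : List Int) (y x total count : Int) (cr : List Int),
      pvLoopA threshold cr total count x (y :: l) =
        cr ++ PySem.Int.truncdiv (total + (y :: l |> pvGroupTail threshold x |>.1).sum)
                (count + ((y :: l |> pvGroupTail threshold x |>.1).length : Int))
            :: ((y :: l |> pvGroupTail threshold x |>.2).map pvAvg) := by
  intro l
  induction l with
  | nil =>
    intro y x total count cr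
    simp only [pvLoopA, pvGroupTail]
    split_ifs with h
    · simp
    · simp [pvAvg, PySem.Int.truncdiv]
  | cons z l ih =>
    intro y x total count cr
    simp only [pvLoopA, pvGroupTail]
    split_ifs with h1 h2 <;>
      · dsimp only
        rw [ih]
        simp only [pvGroupTail]
        split_ifs
        all_goals
          simp only [List.sum_cons, List.length_cons, List.sum_nil, List.length_nil,
            List.map_cons, List.append_assoc, List.cons_append, List.nil_append, pvAvg]
        all_goals congr 2 <;> push_cast <;> ring

theorem average_nearby_spec' :
    ∀ (radii : List Int) (threshold : Int),
      Pre_average_nearby radii threshold →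
      average_nearby radii threshold = average_nearby_alt radii threshold := by
  intro radii threshold _
  unfold average_nearby average_nearby_alt
  cases hs : PySem.List.sorted radii (fun v => v) false with
  | nil => rfl
  | cons t0 rest =>
    cases rest with
    | nil =>
      show [t0] = List.map pvAvg [[t0]]
      simp [pvAvg, PySem.Int.truncdiv]
    | cons y l =>
      show pvLoopA threshold [] t0 1 t0 (y :: l) =
        List.map pvAvg ((t0 :: (pvGroupTail threshold t0 (y :: l)).1) ::
          (pvGroupTail threshold t0 (y :: l)).2)
      rw [pvLoopA_eq]
      simp only [List.nil_append, List.map_cons, pvAvg, List.sum_cons, List.length_cons]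
      congr 2 <;> push_cast <;> ring

-- ===== VERDICT (by name: the statement is the Claim_ definition above) =====
theorem average_nearby_spec : Claim_equal_average_nearby := by
  intro radii threshold _ hpre
  exact average_nearby_spec' radii threshold hpre
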